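-- pv_equiv track=rewrite | github.com/MrBrantCode/unitest_baseline | mut_generate/mist_train_taco/taco_11204/solution.py | calculate_minimum_lights
-- ===== SOURCE A (Python) =====
-- def calculate_minimum_lights(n, lights):
--     def DFS(x, n):
--         count = 0
--         stack = [(x, count)]
--         leaf = 0
--         ans = 0
--         max1 = 0
--         back_stack = []
--         points = [0 for i in range(n + 1)]
--         while len(stack):
--             (temp, count) = stack.pop()
--             back_stack.append(temp)
--             if 2 * temp >= n:
--                 continue
--             for j in range(2):
--                 stack.append((2 * temp + j, count + lights[2 * temp + j - 2]))
--                 points[2 * temp + j] = count + lights[2 * temp + j - 2]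
--         while len(back_stack):
--             temp = back_stack.pop()
--             if 2 * temp >= n:
--                 continue
--             ans = ans + abs(points[2 * temp] - points[2 * temp + 1])
--             if points[2 * temp] > points[2 * temp + 1]:
--                 points[2 * temp + 1] = points[2 * temp]
--             else:
--                 points[2 * temp] = points[2 * temp + 1]
--             points[temp] = points[2 * temp]
--         return ans
--
--     x = 1
--     return DFS(x, 2 ** (n + 1))
-- ===== SOURCE B (Python) =====
-- def calculate_minimum_lights(n, lights):
--     N = 2 ** (n + 1)
--     total = 0
--
--     def f(node):
--         # returns the maximum equalized path sum of the subtree below `node`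
--         nonlocal total
--         if 2 * node >= N:
--             return 0
--         left = f(2 * node) + lights[2 * node - 2]
--         right = f(2 * node + 1) + lights[2 * node + 1 - 2]
--         total += abs(left - right)
--         return max(left, right)
--
--     f(1)
--     return total
-- ===== Notes on version B (the rewrite author's own statement) =====
-- stated objective: simpler
-- what changed: B replaces A's two explicit-stack passes (an iterative DFS that tabulates root-to-node path sums in a points array, then a second loop over the reversed visit order that equalizes sibling sums in place) by one recursive post-order DFS that returns each subtree's maximum path sum and accumulates the sibling differences on the way up, eliminating the points array and both stacks.
import Mathlib
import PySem

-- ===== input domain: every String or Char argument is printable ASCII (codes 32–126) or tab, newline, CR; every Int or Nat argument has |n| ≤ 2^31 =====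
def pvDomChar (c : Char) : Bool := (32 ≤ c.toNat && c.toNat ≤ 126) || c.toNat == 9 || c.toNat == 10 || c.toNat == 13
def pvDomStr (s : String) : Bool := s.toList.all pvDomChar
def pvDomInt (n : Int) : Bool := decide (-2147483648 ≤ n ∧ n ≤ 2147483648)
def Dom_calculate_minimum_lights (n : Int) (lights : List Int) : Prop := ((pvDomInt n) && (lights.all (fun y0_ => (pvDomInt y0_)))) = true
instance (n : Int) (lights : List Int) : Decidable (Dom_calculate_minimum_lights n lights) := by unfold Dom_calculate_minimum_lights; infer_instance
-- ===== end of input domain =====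

-- B fuses A's two explicit-stack passes into one recursive post-order DFS (objective: simpler);
-- equality is proved on Pre_, i.e. on every input where the Python A returns instead of raising.

-- ===== PORT A =====
-- First while loop of A's DFS. The Lean list models the Python stack with head =
-- top (push = cons, pop = head). `lights.getD i 0`: the index is in range under
-- Pre_ (Python raises IndexError outside; those inputs are excluded); the fuel
-- argument only totalizes the loop and is proved never to run out from the entry call.
def pvLoop1 (N : Nat) (lights : List Int) :
    Nat → List (Nat × Int) → List Nat → List Int → List Nat × List Int
  | _, [], bs, pts => (bs, pts)
  | 0, _, bs, pts => (bs, pts)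
  | fuel + 1, (t, c) :: s, bs, pts =>
      let bs := t :: bs
      if N ≤ 2 * t then pvLoop1 N lights fuel s bs pts
      else
        let c0 := c + lights.getD (2 * t - 2) 0
        let c1 := c + lights.getD (2 * t + 1 - 2) 0
        let pts := (pts.set (2 * t) c0).set (2 * t + 1) c1
        pvLoop1 N lights fuel ((2 * t + 1, c1) :: (2 * t, c0) :: s) bs pts

-- Second while loop: pops back_stack (head = Python's last element); no fuel is
-- needed since each step consumes one element.
def pvLoop2 (N : Nat) : List Nat → List Int → Int → Int
  | [], _, ans => ans
  | t :: bs, pts, ans =>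
      if N ≤ 2 * t then pvLoop2 N bs pts ans
      else
        let a := pts.getD (2 * t) 0
        let b := pts.getD (2 * t + 1) 0
        let ans := ans + |a - b|
        let pts := if a > b then pts.set (2 * t + 1) a else pts.set (2 * t) b
        let pts := pts.set t (pts.getD (2 * t) 0)
        pvLoop2 N bs pts ans

def calculate_minimum_lights (n : Int) (lights : List Int) : Int :=
  let N := 2 ^ (n + 1).toNat      -- 2 ** (n + 1); exact for n ≥ -1 (Pre_)
  let pts := List.replicate (N + 1) 0
  let r := pvLoop1 N lights (2 ^ (N + 1)) [(1, 0)] [] pts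
  pvLoop2 N r.1 r.2 0

-- ===== PORT B =====
-- Source B's recursive f: returns (maximum equalized path sum of the subtree below
-- `node`, lights added below `node`), the second component being Source B's `total`
-- accumulator. Fuel only totalizes the recursion (the depth never exceeds it
-- from the entry call).
def pvAltF (N : Nat) (lights : List Int) : Nat → Nat → Int × Int
  | 0, _ => (0, 0)
  | fuel + 1, node =>
      if N ≤ 2 * node then (0, 0)
      else
        let l := pvAltF N lights fuel (2 * node)
        let r := pvAltF N lights fuel (2 * node + 1)
        let left := l.1 + lights.getD (2 * node - 2) 0
        let right := r.1 + lights.getD (2 * node + 1 - 2) 0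
        (max left right, l.2 + r.2 + |left - right|)

def calculate_minimum_lights_alt (n : Int) (lights : List Int) : Int :=
  let N := 2 ^ (n + 1).toNat
  (pvAltF N lights N 1).2

-- ===== PRECONDITION & SPEC =====
-- Pre_ = exactly the inputs where the Python A returns: n ≥ -1 (for n ≤ -2,
-- 2**(n+1) is a float and A raises TypeError) and lights long enough for all
-- indices 0..2^(n+1)-3 read by the tree walk (len+2 ≥ 2^(n+1), phrased via
-- Nat.log2 so the condition is cheap to decide; shorter lights make A raise
-- IndexError).
def Pre_calculate_minimum_lights (n : Int) (lights : List Int) : Prop :=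
  -1 ≤ n ∧ (n + 1).toNat ≤ Nat.log2 (lights.length + 2)
instance (n : Int) (lights : List Int) : Decidable (Pre_calculate_minimum_lights n lights) := by
  unfold Pre_calculate_minimum_lights; infer_instance

def pvWitness_calculate_minimum_lights : Int × List Int := (1, [3, 1])

def Spec_calculate_minimum_lights (n : Int) (lights : List Int) (out : Int) : Prop := out = calculate_minimum_lights_alt n lights
instance (n : Int) (lights : List Int) (out : Int) : Decidable (Spec_calculate_minimum_lights n lights out) := by unfold Spec_calculate_minimum_lights; infer_instance

-- ===== CLAIM (what is proved, stated in full; the proofs are below) =====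
def Claim_equal_calculate_minimum_lights : Prop := ∀ (n : Int) (lights : List Int), Dom_calculate_minimum_lights n lights → Pre_calculate_minimum_lights n lights → Spec_calculate_minimum_lights n lights (calculate_minimum_lights n lights)

-- ===== LEMMAS AND PROOFS =====

-- path sum from the root down to node v (A's `count`/`points` values)
def pvPath (lights : List Int) (v : Nat) : Int :=
  if v ≤ 1 then 0 else pvPath lights (v / 2) + lights.getD (v - 2) 0
  termination_by v
  decreasing_by omega

-- the nodes in the order the first loop pops them (right subtree first); as a
-- set, the subtree rooted at t (the t = 0 guard is never reached from the root)
def pvVisits (N : Nat) (t : Nat) : List Nat :=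
  if N ≤ 2 * t then [t]
  else if t = 0 then [t]
  else t :: (pvVisits N (2 * t + 1) ++ pvVisits N (2 * t))
  termination_by N - t
  decreasing_by all_goals omega

-- ancestor test: a equals v or an iterated parent of v
def pvAnc (a : Nat) (v : Nat) : Bool :=
  if v = a then true else if v < a then false else pvAnc a (v / 2)
  termination_by v
  decreasing_by omega

-- reference recursion: (max equalized subtree path sum, lights added below t)
def pvG (N : Nat) (lights : List Int) (t : Nat) : Int × Int :=
  if N ≤ 2 * t then (0, 0)
  else if t = 0 then (0, 0)
  else
    let l := pvG N lights (2 * t)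
    let r := pvG N lights (2 * t + 1)
    let left := l.1 + lights.getD (2 * t - 2) 0
    let right := r.1 + lights.getD (2 * t + 1 - 2) 0
    (max left right, l.2 + r.2 + |left - right|)
  termination_by N - t
  decreasing_by all_goals omega

lemma pvGetD_set_self {l : List Int} {i : Nat} {x : Int} (h : i < l.length) :
    (l.set i x).getD i 0 = x := by
  simp [List.getD_eq_getElem?_getD, h]

lemma pvGetD_set_ne {l : List Int} {i j : Nat} {x : Int} (h : j ≠ i) :
    (l.set i x).getD j 0 = l.getD j 0 := by
  simp [List.getD_eq_getElem?_getD, (Ne.symm h)]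

lemma pvVisits_self (N t : Nat) : t ∈ pvVisits N t := by
  rw [pvVisits]; split_ifs <;> simp

lemma pvVisits_ge (N : Nat) : ∀ t, ∀ v ∈ pvVisits N t, t ≤ v := by
  intro t
  induction t using pvVisits.induct N with
  | case1 t h => rw [pvVisits]; simp [h]
  | case2 h => rw [pvVisits]; simp
  | case3 t h h0 ihr ihl =>
      rw [pvVisits]; simp only [if_neg h, if_neg h0, List.mem_cons, List.mem_append]
      rintro v (rfl | hv | hv)
      · exact le_refl _
      · have := ihr v hv; omega
      · have := ihl v hv; omega

lemma pvVisits_le (N : Nat) : ∀ t, t ≤ N → ∀ v ∈ pvVisits N t, v ≤ N := by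
  intro t
  induction t using pvVisits.induct N with
  | case1 t h => rw [pvVisits]; simp [h]
  | case2 h => rw [pvVisits]; simp
  | case3 t h h0 ihr ihl =>
      intro htN
      rw [pvVisits]; simp only [if_neg h, if_neg h0, List.mem_cons, List.mem_append]
      rintro v (rfl | hv | hv)
      · exact htN
      · exact ihr (by omega) v hv
      · exact ihl (by omega) v hv

lemma pvAnc_le : ∀ v a, pvAnc a v = true → a ≤ v := by
  intro v
  induction v using Nat.strong_induction_on with
  | _ v IH =>
    intro a h
    rw [pvAnc] at h
    split_ifs at h with h1 h2
    · omega
    · have := IH (v / 2) (by omega) a h; omega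

lemma pvAnc_trans : ∀ v b a, pvAnc a b = true → pvAnc b v = true → pvAnc a v = true := by
  intro v
  induction v using Nat.strong_induction_on with
  | _ v IH =>
    intro b a hab hbv
    rw [pvAnc] at hbv
    split_ifs at hbv with h1 h2
    · subst h1; exact hab
    · have hav2 := IH (v / 2) (by omega) b a hab hbv
      rw [pvAnc]
      split_ifs with g1 g2
      · rfl
      · have h3 := pvAnc_le b a hab
        have h4 := pvAnc_le (v / 2) b hbv
        omega
      · exact hav2

lemma pvAnc_chain : ∀ v a b, pvAnc a v = true → pvAnc b v = true →
    pvAnc a b = true ∨ pvAnc b a = true := by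
  intro v
  induction v using Nat.strong_induction_on with
  | _ v IH =>
    intro a b ha hb
    by_cases h1 : v = a
    · subst h1; right; exact hb
    by_cases h2 : v = b
    · subst h2; left; exact ha
    rw [pvAnc] at ha hb
    rw [if_neg h1] at ha
    rw [if_neg h2] at hb
    split_ifs at ha with hva
    split_ifs at hb with hvb
    exact IH (v / 2) (by omega) a b ha hb

lemma pvVisits_anc (N : Nat) : ∀ t, ∀ v ∈ pvVisits N t, pvAnc t v = true := by
  intro t
  induction t using pvVisits.induct N with
  | case1 t h =>
      rw [pvVisits]; simp only [if_pos h, List.mem_singleton]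
      rintro v rfl; rw [pvAnc]; simp
  | case2 h =>
      rw [pvVisits]
      intro v hv
      simp at hv
      subst hv; rw [pvAnc]; simp
  | case3 t h h0 ihr ihl =>
      rw [pvVisits]; simp only [if_neg h, if_neg h0, List.mem_cons, List.mem_append]
      rintro v (rfl | hv | hv)
      · rw [pvAnc]; simp
      · refine pvAnc_trans v (2 * t + 1) t ?_ (ihr v hv)
        rw [pvAnc]
        rw [if_neg (by omega), if_neg (by omega)]
        have e : (2 * t + 1) / 2 = t := by omega
        rw [e, pvAnc]; simp
      · refine pvAnc_trans v (2 * t) t ?_ (ihl v hv)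
        rw [pvAnc]
        rw [if_neg (by omega), if_neg (by omega)]
        have e : (2 * t) / 2 = t := by omega
        rw [e, pvAnc]; simp

lemma pvVisits_disjoint (N : Nat) {t v : Nat} (ht : 1 ≤ t)
    (h1 : v ∈ pvVisits N (2 * t)) (h2 : v ∈ pvVisits N (2 * t + 1)) : False := by
  have a1 := pvVisits_anc N (2 * t) v h1
  have a2 := pvVisits_anc N (2 * t + 1) v h2
  rcases pvAnc_chain v (2 * t) (2 * t + 1) a1 a2 with h | h
  · rw [pvAnc, if_neg (by omega), if_neg (by omega)] at h
    have e : (2 * t + 1) / 2 = t := by omega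
    rw [e, pvAnc, if_neg (by omega), if_pos (by omega)] at h
    exact absurd h (by simp)
  · rw [pvAnc, if_neg (by omega), if_pos (by omega)] at h
    exact absurd h (by simp)

lemma pvVisits_len (N : Nat) : ∀ h t, 1 ≤ t → N ≤ t * 2 ^ h →
    (pvVisits N t).length ≤ 2 ^ (h + 1) - 1 := by
  intro h
  induction h with
  | zero =>
      intro t ht hNle
      rw [pvVisits, if_pos (by omega)]
      simp
  | succ h IH =>
      intro t ht hN
      by_cases hleaf : N ≤ 2 * t
      · rw [pvVisits, if_pos hleaf]
        have : 1 ≤ 2 ^ (h + 1 + 1) := Nat.one_le_two_pow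
        simp; omega
      · rw [pvVisits, if_neg hleaf, if_neg (by omega)]
        have hr := IH (2 * t + 1) (by omega) (by
          have : t * 2 ^ (h + 1) = 2 * t * 2 ^ h := by ring
          nlinarith [Nat.one_le_two_pow (n := h)])
        have hl := IH (2 * t) (by omega) (by
          have : t * 2 ^ (h + 1) = 2 * t * 2 ^ h := by ring
          omega)
        have e : 2 ^ (h + 1 + 1) = 2 ^ (h + 1) + 2 ^ (h + 1) := by ring
        have h1 : 1 ≤ 2 ^ (h + 1) := Nat.one_le_two_pow
        simp only [List.length_cons, List.length_append]
        omega

lemma pvPath_left (lights : List Int) {t : Nat} (ht : 1 ≤ t) :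
    pvPath lights (2 * t) = pvPath lights t + lights.getD (2 * t - 2) 0 := by
  rw [pvPath, if_neg (by omega)]
  have e : 2 * t / 2 = t := by omega
  rw [e]

lemma pvPath_right (lights : List Int) {t : Nat} (ht : 1 ≤ t) :
    pvPath lights (2 * t + 1) = pvPath lights t + lights.getD (2 * t + 1 - 2) 0 := by
  rw [pvPath, if_neg (by omega)]
  have e : (2 * t + 1) / 2 = t := by omega
  rw [e]

lemma pvAltF_eq (N : Nat) (lights : List Int) :
    ∀ fuel t, 1 ≤ t → N - t < fuel → pvAltF N lights fuel t = pvG N lights t := by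
  intro fuel
  induction fuel with
  | zero => intro t _ h; omega
  | succ fuel IH =>
      intro t ht hf
      rw [pvG]
      by_cases hleaf : N ≤ 2 * t
      · simp [pvAltF, if_pos hleaf]
      · rw [if_neg hleaf, if_neg (by omega)]
        simp only [pvAltF, if_neg hleaf]
        rw [IH (2 * t) (by omega) (by omega), IH (2 * t + 1) (by omega) (by omega)]

lemma pvLoop1_nil (N : Nat) (lights : List Int) (fuel : Nat) (bs : List Nat) (pts : List Int) :
    pvLoop1 N lights fuel [] bs pts = (bs, pts) := by
  cases fuel <;> rfl

lemma pvLoop1_split (N : Nat) (lights : List Int) :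
    ∀ k t, N - t ≤ k → 1 ≤ t → ∀ (s : List (Nat × Int)) (bs : List Nat) (pts : List Int) fuel,
    (pvVisits N t).length ≤ fuel →
    (∀ v ∈ pvVisits N t, v < pts.length) →
    ∃ pts',
      pvLoop1 N lights fuel ((t, pvPath lights t) :: s) bs pts
        = pvLoop1 N lights (fuel - (pvVisits N t).length) s ((pvVisits N t).reverse ++ bs) pts'
      ∧ pts'.length = pts.length
      ∧ (∀ v ∈ pvVisits N t, v ≠ t → pts'.getD v 0 = pvPath lights v)
      ∧ (∀ j, (j ∉ pvVisits N t ∨ j = t) → pts'.getD j 0 = pts.getD j 0) := by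
  intro k
  induction k using Nat.strong_induction_on with
  | _ k IH =>
    intro t hk ht s bs pts fuel hfuel hlen
    have hone : 1 ≤ (pvVisits N t).length := by
      cases hV : pvVisits N t with
      | nil => exact absurd (pvVisits_self N t) (by simp [hV])
      | cons a l => simp
    obtain ⟨f, rfl⟩ : ∃ f, fuel = f + 1 := ⟨fuel - 1, by omega⟩
    by_cases hleaf : N ≤ 2 * t
    · -- leaf: one pop, no pushes
      rw [pvVisits, if_pos hleaf]
      refine ⟨pts, ?_, rfl, by simp, fun j _ => rfl⟩
      simp only [pvLoop1, if_pos hleaf]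
      simp
    · -- internal node
      have hV : pvVisits N t
          = t :: (pvVisits N (2 * t + 1) ++ pvVisits N (2 * t)) := by
        rw [pvVisits, if_neg hleaf, if_neg (by omega)]
      have m2t : 2 * t ∈ pvVisits N t := by
        rw [hV]; exact List.mem_cons_of_mem _ (List.mem_append_right _ (pvVisits_self N (2 * t)))
      have m2t1 : 2 * t + 1 ∈ pvVisits N t := by
        rw [hV]; exact List.mem_cons_of_mem _ (List.mem_append_left _ (pvVisits_self N (2 * t + 1)))
      have hlen2t : 2 * t < pts.length := hlen _ m2t
      have hlen2t1 : 2 * t + 1 < pts.length := hlen _ m2t1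
      have hVlen : (pvVisits N t).length
          = 1 + (pvVisits N (2 * t + 1)).length + (pvVisits N (2 * t)).length := by
        rw [hV]; simp; omega
      -- one loop step
      set c0 := pvPath lights t + lights.getD (2 * t - 2) 0 with hc0
      set c1 := pvPath lights t + lights.getD (2 * t + 1 - 2) 0 with hc1
      set pts1 := (pts.set (2 * t) c0).set (2 * t + 1) c1 with hpts1
      have hstep : pvLoop1 N lights (f + 1) ((t, pvPath lights t) :: s) bs pts
          = pvLoop1 N lights f ((2 * t + 1, c1) :: (2 * t, c0) :: s) (t :: bs) pts1 := by
        simp only [pvLoop1, if_neg hleaf]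
        rfl
      have hlen1 : pts1.length = pts.length := by simp [hpts1]
      -- values in pts1
      have g2t : pts1.getD (2 * t) 0 = c0 := by
        rw [hpts1, pvGetD_set_ne (by omega), pvGetD_set_self hlen2t]
      have g2t1 : pts1.getD (2 * t + 1) 0 = c1 := by
        rw [hpts1, pvGetD_set_self (by simpa using hlen2t1)]
      have gother : ∀ j, j ≠ 2 * t → j ≠ 2 * t + 1 → pts1.getD j 0 = pts.getD j 0 := by
        intro j hj1 hj2
        rw [hpts1, pvGetD_set_ne hj2, pvGetD_set_ne hj1]
      have hc1' : c1 = pvPath lights (2 * t + 1) := (pvPath_right lights ht).symm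
      have hc0' : c0 = pvPath lights (2 * t) := (pvPath_left lights ht).symm
      rw [hc0', hc1'] at hstep
      -- recurse on the right subtree (popped first)
      obtain ⟨pts2, eqr, len2, val2, unch2⟩ :=
        IH (N - (2 * t + 1)) (by omega) (2 * t + 1) (le_refl _) (by omega)
          ((2 * t, pvPath lights (2 * t)) :: s) (t :: bs) pts1 f (by omega)
          (fun v hv => by
            rw [hlen1]; exact hlen v (by rw [hV]; simp [hv]))
      -- recurse on the left subtree
      obtain ⟨pts3, eql, len3, val3, unch3⟩ :=
        IH (N - (2 * t)) (by omega) (2 * t) (le_refl _) (by omega)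
          s ((pvVisits N (2 * t + 1)).reverse ++ t :: bs) pts2
          (f - (pvVisits N (2 * t + 1)).length) (by omega)
          (fun v hv => by
            rw [len2, hlen1]; exact hlen v (by rw [hV]; simp [hv]))
      refine ⟨pts3, ?_, by rw [len3, len2, hlen1], ?_, ?_⟩
      · -- the rewritten run
        rw [hstep, eqr, eql]
        have e1 : f + 1 - (pvVisits N t).length
            = f - (pvVisits N (2 * t + 1)).length - (pvVisits N (2 * t)).length := by omega
        have e2 : (pvVisits N t).reverse ++ bs
            = (pvVisits N (2 * t)).reverse ++ ((pvVisits N (2 * t + 1)).reverse ++ t :: bs) := by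
          rw [hV]; simp
        rw [e1, e2]
      · -- values of visited non-root nodes
        intro v hv hne
        rw [hV] at hv
        simp only [List.mem_cons, List.mem_append] at hv
        rcases hv with rfl | hv | hv
        · exact absurd rfl hne
        · -- v in right subtree
          by_cases hv1 : v = 2 * t + 1
          · subst hv1
            rw [unch3 _ (Or.inl (fun hc => pvVisits_disjoint N ht hc hv)),
              unch2 _ (Or.inr rfl), g2t1, hc1']
          · rw [unch3 _ (Or.inl (fun hc => pvVisits_disjoint N ht hc hv))]
            exact val2 v hv hv1
        · -- v in left subtree
          by_cases hv1 : v = 2 * t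
          · subst hv1
            rw [unch3 _ (Or.inr rfl),
              unch2 _ (Or.inl (fun hc => by have := pvVisits_ge N (2 * t + 1) _ hc; omega)),
              g2t, hc0']
          · exact val3 v hv hv1
      · -- nodes outside the subtree (and the root itself) are unchanged
        have htVr : t ∉ pvVisits N (2 * t + 1) := fun h => by
          have := pvVisits_ge N (2 * t + 1) _ h; omega
        have htVl : t ∉ pvVisits N (2 * t) := fun h => by
          have := pvVisits_ge N (2 * t) _ h; omega
        have hroot : pts3.getD t 0 = pts.getD t 0 := by
          rw [unch3 _ (Or.inl htVl), unch2 _ (Or.inl htVr), gother t (by omega) (by omega)]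
        intro j hj
        rcases hj with hj | rfl
        · have hjVr : j ∉ pvVisits N (2 * t + 1) := fun h => hj (by rw [hV]; simp [h])
          have hjVl : j ∉ pvVisits N (2 * t) := fun h => hj (by rw [hV]; simp [h])
          have hj2t : j ≠ 2 * t := fun h => hj (h ▸ m2t)
          have hj2t1 : j ≠ 2 * t + 1 := fun h => hj (h ▸ m2t1)
          rw [unch3 _ (Or.inl hjVl), unch2 _ (Or.inl hjVr), gother j hj2t hj2t1]
        · exact hroot

lemma pvLoop2_seg (N : Nat) (lights : List Int) :
    ∀ k t, N - t ≤ k → 1 ≤ t → ∀ (bs : List Nat) (pts : List Int) (ans : Int),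
    (∀ v ∈ pvVisits N t, v < pts.length) →
    (∀ v ∈ pvVisits N t, pts.getD v 0 = pvPath lights v) →
    ∃ pts',
      pvLoop2 N ((pvVisits N t).reverse ++ bs) pts ans
        = pvLoop2 N bs pts' (ans + (pvG N lights t).2)
      ∧ pts'.length = pts.length
      ∧ pts'.getD t 0 = pvPath lights t + (pvG N lights t).1
      ∧ (∀ j, j ∉ pvVisits N t → pts'.getD j 0 = pts.getD j 0) := by
  intro k
  induction k using Nat.strong_induction_on with
  | _ k IH =>
    intro t hk ht bs pts ans hlen hvals
    by_cases hleaf : N ≤ 2 * t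
    · rw [pvVisits, if_pos hleaf]
      refine ⟨pts, ?_, rfl, ?_, fun j _ => rfl⟩
      · simp only [List.reverse_singleton, List.singleton_append, pvLoop2, if_pos hleaf]
        rw [pvG, if_pos hleaf]
        simp
      · rw [pvG, if_pos hleaf]
        have := hvals t (pvVisits_self N t)
        simpa using this
    · have hV : pvVisits N t
          = t :: (pvVisits N (2 * t + 1) ++ pvVisits N (2 * t)) := by
        rw [pvVisits, if_neg hleaf, if_neg (by omega)]
      have m2t : 2 * t ∈ pvVisits N t := by
        rw [hV]; exact List.mem_cons_of_mem _ (List.mem_append_right _ (pvVisits_self N (2 * t)))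
      have m2t1 : 2 * t + 1 ∈ pvVisits N t := by
        rw [hV]; exact List.mem_cons_of_mem _ (List.mem_append_left _ (pvVisits_self N (2 * t + 1)))
      have e2 : (pvVisits N t).reverse ++ bs
          = (pvVisits N (2 * t)).reverse ++ ((pvVisits N (2 * t + 1)).reverse ++ t :: bs) := by
        rw [hV]; simp
      -- left subtree segment
      obtain ⟨pts1, eql, len1, root1, unch1⟩ :=
        IH (N - (2 * t)) (by omega) (2 * t) (le_refl _) (by omega)
          ((pvVisits N (2 * t + 1)).reverse ++ t :: bs) pts ans
          (fun v hv => hlen v (by rw [hV]; simp [hv]))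
          (fun v hv => hvals v (by rw [hV]; simp [hv]))
      -- right subtree segment
      obtain ⟨pts2, eqr, len2, root2, unch2⟩ :=
        IH (N - (2 * t + 1)) (by omega) (2 * t + 1) (le_refl _) (by omega)
          (t :: bs) pts1 (ans + (pvG N lights (2 * t)).2)
          (fun v hv => by rw [len1]; exact hlen v (by rw [hV]; simp [hv]))
          (fun v hv => by
            rw [unch1 v (fun hc => pvVisits_disjoint N ht hc hv)]
            exact hvals v (by rw [hV]; simp [hv]))
      -- the step on t itself
      set left := (pvG N lights (2 * t)).1 + lights.getD (2 * t - 2) 0 with hleft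
      set right := (pvG N lights (2 * t + 1)).1 + lights.getD (2 * t + 1 - 2) 0 with hright
      have ha : pts2.getD (2 * t) 0 = pvPath lights t + left := by
        rw [unch2 (2 * t) (fun hc => by have := pvVisits_ge N (2 * t + 1) _ hc; omega),
          root1, pvPath_left lights ht, hleft]
        ring
      have hb : pts2.getD (2 * t + 1) 0 = pvPath lights t + right := by
        rw [root2, pvPath_right lights ht, hright]; ring
      have hG : pvG N lights t
          = (max left right, (pvG N lights (2 * t)).2 + (pvG N lights (2 * t + 1)).2
              + |left - right|) := by
        rw [pvG, if_neg hleaf, if_neg (by omega)]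
      have habs : |pts2.getD (2 * t) 0 - pts2.getD (2 * t + 1) 0| = |left - right| := by
        have h : pts2.getD (2 * t) 0 - pts2.getD (2 * t + 1) 0 = left - right := by
          rw [ha, hb]; ring
        rw [h]
      set pts3 := (if pts2.getD (2 * t) 0 > pts2.getD (2 * t + 1) 0
          then pts2.set (2 * t + 1) (pts2.getD (2 * t) 0)
          else pts2.set (2 * t) (pts2.getD (2 * t + 1) 0)) with hpts3
      have hlen3 : pts3.length = pts.length := by
        rw [hpts3]; split_ifs <;> simp [len2, len1]
      have hval3 : pts3.getD (2 * t) 0 = pvPath lights t + max left right := by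
        rw [hpts3]
        split_ifs with hab
        · rw [pvGetD_set_ne (by omega)]
          have hm : max left right = left := by
            rw [ha, hb] at hab; exact max_eq_left (by omega)
          rw [hm]; exact ha
        · have hblt : 2 * t < pts2.length := by
            rw [len2, len1]; exact hlen _ m2t
          rw [pvGetD_set_self hblt]
          have hm : max left right = right := by
            rw [ha, hb] at hab
            exact max_eq_right (by omega)
          rw [hm]; exact hb
      set pts4 := pts3.set t (pts3.getD (2 * t) 0) with hpts4
      have hstep : pvLoop2 N (t :: bs) pts2
            (ans + (pvG N lights (2 * t)).2 + (pvG N lights (2 * t + 1)).2)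
          = pvLoop2 N bs pts4 (ans + (pvG N lights t).2) := by
        simp only [pvLoop2, if_neg hleaf]
        rw [hG]
        dsimp only
        rw [habs]
        congr 1
        ring
      refine ⟨pts4, ?_, ?_, ?_, ?_⟩
      · rw [e2, eql, eqr, hstep]
      · rw [hpts4, List.length_set, hlen3]
      · have htlt : t < pts3.length := by rw [hlen3]; exact hlen t (pvVisits_self N t)
        rw [hpts4, pvGetD_set_self htlt, hval3, hG]
      · intro j hj
        have hjt : j ≠ t := fun h => hj (h ▸ pvVisits_self N t)
        have hjVr : j ∉ pvVisits N (2 * t + 1) := fun h => hj (by rw [hV]; simp [h])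
        have hjVl : j ∉ pvVisits N (2 * t) := fun h => hj (by rw [hV]; simp [h])
        have hj2t : j ≠ 2 * t := fun h => hj (h ▸ m2t)
        have hj2t1 : j ≠ 2 * t + 1 := fun h => hj (h ▸ m2t1)
        have hsw : pts3.getD j 0 = pts2.getD j 0 := by
          rw [hpts3]
          split_ifs <;> [exact pvGetD_set_ne hj2t1; exact pvGetD_set_ne hj2t]
        rw [hpts4, pvGetD_set_ne hjt, hsw, unch2 _ hjVr, unch1 _ hjVl]

lemma pvReplicate_getD (N j : Nat) : (List.replicate (N + 1) (0 : Int)).getD j 0 = 0 := by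
  simp [List.getD_eq_getElem?_getD, List.getElem?_replicate]
  split_ifs <;> simp

-- ===== VERDICT (by name: the statement is the Claim_ definition above) =====
theorem calculate_minimum_lights_spec : Claim_equal_calculate_minimum_lights := by
  intro n lights _ _
  unfold Spec_calculate_minimum_lights calculate_minimum_lights calculate_minimum_lights_alt
  set N := 2 ^ (n + 1).toNat with hN
  have hN1 : 1 ≤ N := Nat.one_le_two_pow
  -- characterize the first loop
  have hfuel : (pvVisits N 1).length ≤ 2 ^ (N + 1) := by
    have := pvVisits_len N N 1 (le_refl _) (by simpa using (Nat.lt_two_pow_self (n := N)).le)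
    have h1 : 1 ≤ 2 ^ (N + 1) := Nat.one_le_two_pow
    omega
  have hp1 : (0 : Int) = pvPath lights 1 := by rw [pvPath]; simp
  obtain ⟨pts', eq1, len1, val1, unch1⟩ :=
    pvLoop1_split N lights N 1 (by omega) (le_refl _)
      [] [] (List.replicate (N + 1) 0) (2 ^ (N + 1)) hfuel
      (fun v hv => by
        have := pvVisits_le N 1 hN1 v hv
        simp; omega)
  rw [pvLoop1_nil] at eq1
  -- characterize the second loop
  obtain ⟨pts'', eq2, _, _, _⟩ :=
    pvLoop2_seg N lights N 1 (by omega) (le_refl _) [] pts' 0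
      (fun v hv => by
        have := pvVisits_le N 1 hN1 v hv
        rw [len1]; simp; omega)
      (fun v hv => by
        by_cases hv1 : v = 1
        · subst hv1
          rw [unch1 1 (Or.inr rfl), pvReplicate_getD, ← hp1]
        · exact val1 v hv hv1)
  -- assemble
  have hpair : ((1 : Nat), (0 : Int)) = (1, pvPath lights 1) := by rw [← hp1]
  show pvLoop2 N (pvLoop1 N lights (2 ^ (N + 1)) [(1, 0)] [] (List.replicate (N + 1) 0)).1
      (pvLoop1 N lights (2 ^ (N + 1)) [(1, 0)] [] (List.replicate (N + 1) 0)).2 0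
      = (pvAltF N lights N 1).2
  rw [hpair, eq1]
  dsimp only
  rw [eq2, pvAltF_eq N lights N 1 (le_refl _) (by omega)]
  show 0 + (pvG N lights 1).2 = (pvG N lights 1).2
  omega
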